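-- pv_equiv track=rewrite | github.com/kryo1337/valodiscordhub | bot/cogs/rank.py | get_role_name_from_rank
-- ===== SOURCE A (Python) =====
-- RANK_GROUPS = {
--     "iron-plat": ["Iron", "Bronze", "Silver", "Gold", "Platinum"],
--     "dia-asc": ["Diamond", "Ascendant"],
--     "imm-radiant": ["Immortal", "Radiant"],
-- }
--
-- def get_role_name_from_rank(rank: str) -> str:
--     if not rank:
--         return None
--     base_rank = rank.split()[0]
--     for role_name, ranks in RANK_GROUPS.items():
--         if base_rank in [r.capitalize() for r in ranks]:
--             return role_name
--     return None
-- ===== SOURCE B (Python) =====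
-- RANK_GROUPS = {
--     "iron-plat": ["Iron", "Bronze", "Silver", "Gold", "Platinum"],
--     "dia-asc": ["Diamond", "Ascendant"],
--     "imm-radiant": ["Immortal", "Radiant"],
-- }
--
-- _PAIRS = [(r, group) for group, ranks in RANK_GROUPS.items() for r in ranks]
--
-- def get_role_name_from_rank(rank: str) -> str:
--     if not rank:
--         return None
--     t = rank.lstrip()
--     for name, group in _PAIRS:
--         if t.startswith(name) and (len(t) == len(name) or t[len(name)].isspace()):
--             return group
--     return None
-- ===== Notes on version B (the rewrite author's own statement) =====
-- stated objective: alternative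
-- what changed: B never splits the string or capitalizes the table: it strips leading whitespace once and does character-level prefix matching with a word-boundary check against a flat (rank, group) pair list, instead of extracting the first word and testing membership in per-group capitalized lists.
import Mathlib
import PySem

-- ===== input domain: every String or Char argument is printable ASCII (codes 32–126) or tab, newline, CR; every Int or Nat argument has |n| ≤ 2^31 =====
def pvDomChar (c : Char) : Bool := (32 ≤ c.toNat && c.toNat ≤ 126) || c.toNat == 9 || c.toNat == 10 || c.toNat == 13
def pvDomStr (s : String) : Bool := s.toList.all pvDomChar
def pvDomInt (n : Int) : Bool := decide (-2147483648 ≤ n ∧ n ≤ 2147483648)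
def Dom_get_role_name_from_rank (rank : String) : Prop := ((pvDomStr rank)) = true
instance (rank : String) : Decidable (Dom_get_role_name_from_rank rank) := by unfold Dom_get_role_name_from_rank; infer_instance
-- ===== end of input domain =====

-- B never split()s out a word and never capitalizes the table: it strips leading whitespace
-- once and prefix-matches each (rank, group) pair with a word-boundary check ('alternative').

-- ===== PORT A =====
-- shared module-level constant RANK_GROUPS (a dict literal)
def rankGroups : PySem.Dict String (List String) :=
  PySem.Dict.ofList
    [ ("iron-plat", ["Iron", "Bronze", "Silver", "Gold", "Platinum"]),
      ("dia-asc", ["Diamond", "Ascendant"]),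
      ("imm-radiant", ["Immortal", "Radiant"]) ]

-- str.capitalize(): first char upper, rest lower (exact on the ASCII domain)
def pyCapitalize (s : String) : String :=
  match s.toList with
  | [] => ""
  | c :: cs => String.ofList (PySem.Chars.upperChar c :: cs.map PySem.Chars.lowerChar)

-- the 'for role_name, ranks in RANK_GROUPS.items()' loop
def rankLoop (base : String) : List (String × List String) → Option String
  | [] => none
  | (role_name, ranks) :: rest =>
      if (ranks.map pyCapitalize).contains base then some role_name
      else rankLoop base rest

def get_role_name_from_rank (rank : String) : Option String :=
  if rank = "" then none
  else
    match PySem.List.pyGet? (PySem.Str.split₀ rank) 0 with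
    | none => none   -- IndexError in Python (whitespace-only rank); excluded by Pre_
    | some base_rank => rankLoop base_rank (PySem.Dict.items rankGroups)

-- ===== PORT B =====
-- module-level _PAIRS = [(r, group) for group, ranks in RANK_GROUPS.items() for r in ranks]
def rankPairs : List (String × String) :=
  (PySem.Dict.items rankGroups).flatMap (fun gr => gr.2.map (fun r => (r, gr.1)))

-- the loop body's test: t.startswith(name) and (len(t) == len(name) or t[len(name)].isspace())
-- (the 'none' arm of the index is unreachable: startswith plus len(t) ≠ len(name) put it in range)
def bMatch (t name : String) : Bool :=
  PySem.Str.startswith t name &&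
    (PySem.Str.len t == PySem.Str.len name ||
      (match PySem.Str.pyGet? t (PySem.Str.len name) with
       | some c => PySem.Chars.isspace c
       | none => false))

-- the 'for name, group in _PAIRS' loop
def bLoop (t : String) : List (String × String) → Option String
  | [] => none
  | (name, group) :: rest => if bMatch t name then some group else bLoop t rest

def get_role_name_from_rank_alt (rank : String) : Option String :=
  if rank = "" then none
  else bLoop (PySem.Str.lstrip rank) rankPairs

-- ===== PRECONDITION & SPEC =====
-- Pre_ excludes exactly the non-empty all-whitespace strings, on which A's rank.split()[0]
-- raises IndexError (B's own loop also matches nothing and returns None there).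
def Pre_get_role_name_from_rank (rank : String) : Prop :=
  rank = "" ∨ PySem.Str.strIsspace rank = false
instance (rank : String) : Decidable (Pre_get_role_name_from_rank rank) := by
  unfold Pre_get_role_name_from_rank; infer_instance
def pvWitness_get_role_name_from_rank : String := "Gold 2"

def Spec_get_role_name_from_rank (rank : String) (out : Option String) : Prop := out = get_role_name_from_rank_alt rank
instance (rank : String) (out : Option String) : Decidable (Spec_get_role_name_from_rank rank out) := by unfold Spec_get_role_name_from_rank; infer_instance

-- ===== CLAIM (what is proved, stated in full; the proofs are below) =====
def Claim_equal_get_role_name_from_rank : Prop := ∀ (rank : String), Dom_get_role_name_from_rank rank → Pre_get_role_name_from_rank rank → Spec_get_role_name_from_rank rank (get_role_name_from_rank rank)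
-- ===== LEMMAS AND PROOFS =====

-- the non-whitespace predicate that delimits split₀'s words
def nsp (c : Char) : Bool := !PySem.Chars.isspace c

-- split₀.go threads its accumulator through unchanged (it is reversed only at the end)
lemma go_acc (t : List Char) : ∀ (cur : List Char) (acc : List (List Char)),
    PySem.Chars.split₀.go t cur acc = acc.reverse ++ PySem.Chars.split₀.go t cur [] := by
  induction t with
  | nil =>
    intro cur acc
    simp only [PySem.Chars.split₀.go]
    split <;> simp
  | cons c rest ih =>
    intro cur acc
    simp only [PySem.Chars.split₀.go]
    split
    · split
      · exact ih [] acc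
      · rw [ih [] (cur.reverse :: acc), ih [] [cur.reverse]]
        simp
    · exact ih (c :: cur) acc

-- the first word split₀.go produces: finish the in-progress word, else skip spaces and take a run
lemma go_first (t : List Char) : ∀ (cur : List Char),
    (PySem.Chars.split₀.go t cur []).head? =
      if cur = [] then
        (if t.dropWhile PySem.Chars.isspace = [] then none
         else some ((t.dropWhile PySem.Chars.isspace).takeWhile nsp))
      else some (cur.reverse ++ t.takeWhile nsp) := by
  induction t with
  | nil =>
    intro cur
    simp only [PySem.Chars.split₀.go, List.dropWhile_nil, List.takeWhile_nil]
    cases cur <;> simp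
  | cons c rest ih =>
    intro cur
    simp only [PySem.Chars.split₀.go]
    by_cases hc : PySem.Chars.isspace c = true
    · simp only [hc, if_true]
      by_cases hcur : cur = []
      · subst hcur
        simp only [List.isEmpty_nil, if_true, ih []]
        simp [List.dropWhile_cons, hc]
      · have : cur.isEmpty = false := by simpa [List.isEmpty_iff] using hcur
        simp only [this, Bool.false_eq_true, if_false, go_acc rest [] [cur.reverse]]
        have htw : (c :: rest).takeWhile nsp = [] := by simp [nsp, hc]
        simp [hcur, htw]
    · have hcb : PySem.Chars.isspace c = false := by simpa using hc
      simp only [hcb, Bool.false_eq_true, if_false, ih (c :: cur)]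
      have htw : (c :: rest).takeWhile nsp = c :: rest.takeWhile nsp := by
        simp [nsp, hcb]
      by_cases hcur : cur = []
      · subst hcur
        simp [List.dropWhile_cons, hcb, htw]
      · simp [hcur, htw]

-- s.split()'s first word = takeWhile non-space of dropWhile space
lemma split0_head (s : List Char) :
    (PySem.Chars.split₀ s).head? =
      if s.dropWhile PySem.Chars.isspace = [] then none
      else some ((s.dropWhile PySem.Chars.isspace).takeWhile nsp) := by
  simpa using go_first s []

-- B's per-pair test succeeds exactly when the first non-space run of t is the rank name
lemma match_iff (tstr : String) (w : String) (hw : w.toList ≠ [])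
    (hwp : ∀ c ∈ w.toList, nsp c = true) :
    (bMatch tstr w = true) ↔ tstr.toList.takeWhile nsp = w.toList := by
  have hlen : PySem.Str.len tstr = (tstr.toList.length : Int) := by
    simp [PySem.Str.len_eq]
  have hlenw : PySem.Str.len w = (w.toList.length : Int) := by
    simp [PySem.Str.len_eq]
  have hget : PySem.Str.pyGet? tstr (PySem.Str.len w) = tstr.toList[w.toList.length]? := by
    simp [hlenw]
  constructor
  · intro h
    unfold bMatch at h
    simp only [Bool.and_eq_true, Bool.or_eq_true] at h
    obtain ⟨hsw, hrest⟩ := h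
    have hp : w.toList <+: tstr.toList := by
      rw [PySem.Str.startswith_eq] at hsw
      exact (PySem.Chars.startswith_iff _ _).mp hsw
    obtain ⟨r, hr⟩ := hp
    rw [← hr]
    rw [List.takeWhile_append]
    have htk : w.toList.takeWhile nsp = w.toList := List.takeWhile_eq_self_iff.mpr hwp
    rcases hrest with hlen' | hidx
    · have : tstr.toList.length = w.toList.length := by
        rw [hlen, hlenw, beq_iff_eq] at hlen'; exact_mod_cast hlen'
      have hr0 : r = [] := by
        have hlr := congrArg List.length hr
        simp only [List.length_append] at hlr
        rw [this] at hlr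
        have : r.length = 0 := by omega
        exact List.eq_nil_of_length_eq_zero this
      simp [hr0, htk]
    · rw [hget, ← hr] at hidx
      rw [List.getElem?_append_right (by omega)] at hidx
      simp only [Nat.sub_self] at hidx
      cases r with
      | nil => simp [htk]
      | cons c r' =>
        simp only [List.getElem?_cons_zero] at hidx
        have hcs : PySem.Chars.isspace c = true := by
          cases h2 : PySem.Chars.isspace c
          · simp [h2] at hidx
          · rfl
        simp [htk, nsp, hcs]
  · intro h
    have hp : w.toList <+: tstr.toList := h ▸ List.takeWhile_prefix nsp
    obtain ⟨r, hr⟩ := hp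
    unfold bMatch
    simp only [Bool.and_eq_true, Bool.or_eq_true]
    refine ⟨by rw [PySem.Str.startswith_eq]; exact (PySem.Chars.startswith_iff _ _).mpr ⟨r, hr⟩, ?_⟩
    have htk : w.toList.takeWhile nsp = w.toList := List.takeWhile_eq_self_iff.mpr hwp
    cases r with
    | nil =>
      left
      rw [hlen, hlenw, beq_iff_eq]
      rw [← hr]; simp
    | cons c r' =>
      right
      have hcs : PySem.Chars.isspace c = true := by
        cases h2 : PySem.Chars.isspace c
        · exfalso
          have hnsp : nsp c = true := by simp [nsp, h2]
          rw [← hr, List.takeWhile_append] at h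
          simp [htk, hnsp] at h
        · rfl
      rw [hget, ← hr, List.getElem?_append_right (Nat.le_refl _)]
      simp [hcs]

-- A's grouped membership scan agrees with B's flat prefix scan whenever base is t's first word
set_option maxRecDepth 4096 in
lemma loops_agree (tstr base : String) (hb : base.toList = tstr.toList.takeWhile nsp) :
    rankLoop base (PySem.Dict.items rankGroups) = bLoop tstr rankPairs := by
  have key : ∀ (w : String), w.toList ≠ [] → w.toList.all nsp = true →
      bMatch tstr w = (base == w) := by
    intro w h1 h2
    rw [Bool.eq_iff_iff, match_iff tstr w h1 (List.all_eq_true.mp h2), ← hb, beq_iff_eq]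
    exact ⟨fun h => String.toList_inj.mp h, fun h => congrArg String.toList h⟩
  have k1 := key "Iron" (by decide) (by decide)
  have k2 := key "Bronze" (by decide) (by decide)
  have k3 := key "Silver" (by decide) (by decide)
  have k4 := key "Gold" (by decide) (by decide)
  have k5 := key "Platinum" (by decide) (by decide)
  have k6 := key "Diamond" (by decide) (by decide)
  have k7 := key "Ascendant" (by decide) (by decide)
  have k8 := key "Immortal" (by decide) (by decide)
  have k9 := key "Radiant" (by decide) (by decide)
  have hitems : PySem.Dict.items rankGroups =
    [("iron-plat", ["Iron", "Bronze", "Silver", "Gold", "Platinum"]), ("dia-asc", ["Diamond", "Ascendant"]),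
     ("imm-radiant", ["Immortal", "Radiant"])] := by decide
  have hpairs : rankPairs =
    [("Iron","iron-plat"),("Bronze","iron-plat"),("Silver","iron-plat"),("Gold","iron-plat"),
     ("Platinum","iron-plat"),("Diamond","dia-asc"),("Ascendant","dia-asc"),
     ("Immortal","imm-radiant"),("Radiant","imm-radiant")] := by decide
  have c1 : List.map pyCapitalize ["Iron", "Bronze", "Silver", "Gold", "Platinum"]
      = ["Iron", "Bronze", "Silver", "Gold", "Platinum"] := by decide
  have c2 : List.map pyCapitalize ["Diamond", "Ascendant"] = ["Diamond", "Ascendant"] := by decide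
  have c3 : List.map pyCapitalize ["Immortal", "Radiant"] = ["Immortal", "Radiant"] := by decide
  rw [hitems, hpairs]
  simp only [rankLoop, bLoop, c1, c2, c3, k1, k2, k3, k4, k5, k6, k7, k8, k9,
    List.contains_cons, List.contains_nil]
  cases base == "Iron" <;> cases base == "Bronze" <;> cases base == "Silver" <;>
    cases base == "Gold" <;> cases base == "Platinum" <;> cases base == "Diamond" <;>
    cases base == "Ascendant" <;> cases base == "Immortal" <;> cases base == "Radiant" <;> simp

-- ===== VERDICT (by name: the statement is the Claim_ definition above) =====
theorem get_role_name_from_rank_spec : Claim_equal_get_role_name_from_rank := by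
  intro rank _ hpre
  unfold Spec_get_role_name_from_rank
  unfold get_role_name_from_rank get_role_name_from_rank_alt
  by_cases hrank : rank = ""
  · simp [hrank]
  · simp only [hrank, if_false]
    have hs : rank.toList ≠ [] := by
      intro h
      exact hrank (String.toList_inj.mp (by simpa using h))
    have hws : PySem.Str.strIsspace rank = false := hpre.resolve_left hrank
    have hdrop : rank.toList.dropWhile PySem.Chars.isspace ≠ [] := by
      intro h
      have hall := List.dropWhile_eq_nil_iff.mp h
      have : PySem.Chars.strIsspace rank.toList = true := by
        unfold PySem.Chars.strIsspace
        simp [List.isEmpty_iff, hs, List.all_eq_true]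
        exact fun c hc => hall c hc
      rw [PySem.Str.strIsspace_eq] at hws
      rw [this] at hws
      exact Bool.true_eq_false.mp hws
    have hmap := PySem.Str.split₀_map_toList rank
    have hhead := split0_head rank.toList
    rw [if_neg hdrop] at hhead
    have hget0 : PySem.List.pyGet? (PySem.Str.split₀ rank) 0 = (PySem.Str.split₀ rank).head? := by
      have : (0 : Int) = ((0 : Nat) : Int) := rfl
      rw [this, PySem.List.pyGet?_natCast]
      simp [List.head?_eq_getElem?]
    rw [hget0]
    have hmaphead : (PySem.Str.split₀ rank).head?.map String.toList = (PySem.Chars.split₀ rank.toList).head? := by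
      rw [← hmap, List.head?_map]
    cases hcase : (PySem.Str.split₀ rank).head? with
    | none =>
      rw [hcase] at hmaphead
      rw [hhead] at hmaphead
      simp at hmaphead
    | some base =>
      have hbase : base.toList = (rank.toList.dropWhile PySem.Chars.isspace).takeWhile nsp := by
        rw [hcase] at hmaphead
        rw [hhead] at hmaphead
        simpa using hmaphead
      apply loops_agree
      rw [hbase, PySem.Str.toList_lstrip]
      simp [PySem.Chars.lstrip]
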